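-- pv_equiv track=rewrite | github.com/zhangshengoo/ASR-EVAL | evaluation/hotword_metrics.py | _build_position_map
-- ===== SOURCE A (Python) =====
-- from typing import List, Dict, Tuple
--
-- def _build_position_map(alignment: List[Tuple[str, str]]) -> Dict[int, int]:
--     """构建参考到预测的位置映射"""
--     ref_pos, hyp_pos = 0, 0
--     pos_map = {}
--
--     for ref_char, hyp_char in alignment:
--         if ref_char and hyp_char:  # 匹配
--             pos_map[ref_pos] = hyp_pos
--             ref_pos += 1
--             hyp_pos += 1
--         elif ref_char:  # 删除
--             ref_pos += 1
--         elif hyp_char:  # 插入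
--             hyp_pos += 1
--
--     return pos_map
-- ===== SOURCE B (Python) =====
-- def _build_position_map(alignment):
--     """Two-pass variant: exclusive prefix counts, then a matched-only comprehension."""
--     n = len(alignment)
--     ref_idx = [0] * (n + 1)
--     hyp_idx = [0] * (n + 1)
--     for i, (r, h) in enumerate(alignment):
--         ref_idx[i + 1] = ref_idx[i] + (1 if r else 0)
--         hyp_idx[i + 1] = hyp_idx[i] + (1 if h else 0)
--     return {ref_idx[i]: hyp_idx[i]
--             for i, (r, h) in enumerate(alignment) if r and h}
-- ===== Notes on version B (the rewrite author's own statement) =====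
-- stated objective: alternative
-- what changed: Replaces the single loop that threads two running counters and a dict with a two-stage decomposition: one pass builds exclusive prefix-count arrays for non-empty ref/hyp chars, and a second matched-only comprehension over enumerate(alignment) reads the positions from those arrays.
import Mathlib
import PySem

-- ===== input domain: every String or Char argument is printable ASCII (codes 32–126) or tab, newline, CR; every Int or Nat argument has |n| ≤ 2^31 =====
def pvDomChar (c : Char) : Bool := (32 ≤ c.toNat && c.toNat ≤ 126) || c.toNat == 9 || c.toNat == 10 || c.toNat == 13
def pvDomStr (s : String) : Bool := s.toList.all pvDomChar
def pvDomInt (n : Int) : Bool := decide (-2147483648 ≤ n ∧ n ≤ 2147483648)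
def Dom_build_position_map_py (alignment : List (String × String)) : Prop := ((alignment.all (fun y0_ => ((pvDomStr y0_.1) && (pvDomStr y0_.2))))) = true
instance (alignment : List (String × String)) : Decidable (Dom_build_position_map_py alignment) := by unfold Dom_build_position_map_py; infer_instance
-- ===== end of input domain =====

-- B changes the decomposition (prefix-count arrays + matched-only pass) instead of threading counters through one dict-building loop; same O(n) cost.

-- ===== PORT A =====
-- one loop iteration of A: update (ref_pos, hyp_pos, pos_map)
def pvStepA (st : Int × Int × PySem.Dict Int Int) (p : String × String) :
    Int × Int × PySem.Dict Int Int :=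
  if p.1 != "" && p.2 != "" then (st.1 + 1, st.2.1 + 1, st.2.2.insert st.1 st.2.1)
  else if p.1 != "" then (st.1 + 1, st.2.1, st.2.2)
  else if p.2 != "" then (st.1, st.2.1 + 1, st.2.2)
  else st

def build_position_map_py (alignment : List (String × String)) : List (Int × Int) :=
  ((alignment.foldl pvStepA (0, 0, PySem.Dict.empty)).2.2).items

-- ===== PORT B =====
-- the prefix-array-building loop of B: exclusive prefix counts (length n+1), starting from acc
def pvPrefix (f : String × String → Bool) (acc : Int) : List (String × String) → List Int
  | [] => [acc]
  | p :: xs => acc :: pvPrefix f (acc + if f p then 1 else 0) xs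

def build_position_map_py_alt (alignment : List (String × String)) : List (Int × Int) :=
  let ref_idx := pvPrefix (fun p => p.1 != "") 0 alignment
  let hyp_idx := pvPrefix (fun p => p.2 != "") 0 alignment
  (PySem.List.enumerate alignment 0).filterMap (fun x =>
    if x.2.1 != "" && x.2.2 != "" then
      some (PySem.List.pyGetD ref_idx x.1 0, PySem.List.pyGetD hyp_idx x.1 0)
    else none)

-- ===== PRECONDITION & SPEC =====
def Spec_build_position_map_py (alignment : List (String × String)) (out : List (Int × Int)) : Prop := out = build_position_map_py_alt alignment
instance (alignment : List (String × String)) (out : List (Int × Int)) : Decidable (Spec_build_position_map_py alignment out) := by unfold Spec_build_position_map_py; infer_instance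

-- ===== CLAIM (what is proved, stated in full; the proofs are below) =====
def Claim_equal_build_position_map_py : Prop := ∀ (alignment : List (String × String)), Dom_build_position_map_py alignment → Spec_build_position_map_py alignment (build_position_map_py alignment)

-- ===== LEMMAS AND PROOFS =====

-- the common value: matched pairs with their ref/hyp positions, offsets r h
def pvMatched (r h : Int) : List (String × String) → List (Int × Int)
  | [] => []
  | p :: xs =>
    if p.1 != "" && p.2 != "" then (r, h) :: pvMatched (r + 1) (h + 1) xs
    else if p.1 != "" then pvMatched (r + 1) h xs
    else if p.2 != "" then pvMatched r (h + 1) xs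
    else pvMatched r h xs

lemma pvFoldA_items (xs : List (String × String)) :
    ∀ (r h : Int) (d : PySem.Dict Int Int), d.keys.Nodup → (∀ k ∈ d.keys, k < r) →
    ((xs.foldl pvStepA (r, h, d)).2.2).items = d.items ++ pvMatched r h xs := by
  induction xs with
  | nil => intro r h d _ _; simp [pvMatched]
  | cons p xs ih =>
    intro r h d hnd hlt
    simp only [List.foldl_cons, pvMatched, pvStepA]
    by_cases h1 : (p.1 != "") = true <;> by_cases h2 : (p.2 != "") = true <;>
      simp only [h1, h2, Bool.and_self, Bool.and_false, Bool.false_and, if_true, if_false, Bool.false_eq_true]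
    · -- matched branch
      have hc : d.contains r = false := by
        cases hb : d.contains r
        · rfl
        · exact absurd (hlt r ((PySem.Dict.contains_iff_mem_keys d r).1 hb)) (by omega)
      rw [ih (r + 1) (h + 1) (d.insert r h)
        (PySem.Dict.nodup_keys_insert d r h hnd)
        (by intro k hk
            rcases (PySem.Dict.mem_keys_insert d r k h).1 hk with hk | hk
            · omega
            · have := hlt k hk; omega)]
      rw [PySem.Dict.items_insert_of_not_contains d h hc]
      simp
    · exact ih _ _ d hnd (by intro k hk; have := hlt k hk; omega)
    · exact ih _ _ d hnd hlt
    · exact ih _ _ d hnd hlt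

-- enumerate from s is enumerate from 0 with fst shifted by s
lemma pvEnumerate_shift {α : Type} (xs : List α) :
    ∀ (s : Int), PySem.List.enumerate xs s
      = (PySem.List.enumerate xs 0).map (fun p => (p.1 + s, p.2)) := by
  induction xs with
  | nil => intro s; simp [PySem.List.enumerate_nil]
  | cons x xs ih =>
    intro s
    rw [PySem.List.enumerate_cons, PySem.List.enumerate_cons]
    simp only [zero_add]
    rw [ih (s + 1), ih 1]
    simp [List.map_map, Function.comp]
    intro a b _
    omega

lemma pvAlt_eq_matched (xs : List (String × String)) :
    ∀ (a b : Int),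
    (PySem.List.enumerate xs 0).filterMap (fun x =>
      if x.2.1 != "" && x.2.2 != "" then
        some (PySem.List.pyGetD (pvPrefix (fun p => p.1 != "") a xs) x.1 0,
              PySem.List.pyGetD (pvPrefix (fun p => p.2 != "") b xs) x.1 0)
      else none) = pvMatched a b xs := by
  induction xs with
  | nil => intro a b; simp [PySem.List.enumerate_nil, pvMatched]
  | cons p xs ih =>
    intro a b
    rw [PySem.List.enumerate_cons]
    simp only [zero_add]
    rw [pvEnumerate_shift xs 1]
    simp only [List.filterMap_cons, List.filterMap_map, pvMatched, pvPrefix]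
    have hshift : ∀ (l : List Int) (c : Int) (x : Int × (String × String)),
        x ∈ PySem.List.enumerate xs 0 →
        PySem.List.pyGetD (c :: l) (x.1 + 1) 0 = PySem.List.pyGetD l x.1 0 := by
      intro l c x hx
      rcases (PySem.List.mem_enumerate_iff xs 0 x).1 hx with ⟨k, hk, hxk⟩
      subst hxk
      simp only [zero_add]
      have : ((k : Int) + 1) = ((k + 1 : Nat) : Int) := by push_cast; ring
      rw [this, PySem.List.pyGetD_natCast, PySem.List.pyGetD_natCast]
      simp [List.getD]
    by_cases h1 : (p.1 != "") = true <;> by_cases h2 : (p.2 != "") = true <;>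
      simp only [h1, h2, Bool.and_self, Bool.and_false, Bool.false_and, if_true, if_false, Bool.false_eq_true, add_zero]
    · rw [PySem.List.pyGetD_zero_cons, PySem.List.pyGetD_zero_cons]
      congr 1
      rw [← ih (a + 1) (b + 1)]
      refine List.filterMap_congr ?_
      intro x hx
      by_cases hc : (x.2.1 != "" && x.2.2 != "") = true <;>
        simp [Function.comp, hc, hshift _ a x hx, hshift _ b x hx]
    · rw [← ih (a + 1) b]
      refine List.filterMap_congr ?_
      intro x hx
      by_cases hc : (x.2.1 != "" && x.2.2 != "") = true <;>
        simp [Function.comp, hc, hshift _ a x hx, hshift _ b x hx]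
    · rw [← ih a (b + 1)]
      refine List.filterMap_congr ?_
      intro x hx
      by_cases hc : (x.2.1 != "" && x.2.2 != "") = true <;>
        simp [Function.comp, hc, hshift _ a x hx, hshift _ b x hx]
    · rw [← ih a b]
      refine List.filterMap_congr ?_
      intro x hx
      by_cases hc : (x.2.1 != "" && x.2.2 != "") = true <;>
        simp [Function.comp, hc, hshift _ a x hx, hshift _ b x hx]

-- ===== VERDICT (by name: the statement is the Claim_ definition above) =====
theorem build_position_map_py_spec : Claim_equal_build_position_map_py := by
  intro alignment _
  unfold Spec_build_position_map_py build_position_map_py build_position_map_py_alt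
  rw [pvFoldA_items alignment 0 0 PySem.Dict.empty (by simp) (by simp),
      pvAlt_eq_matched alignment 0 0]
  simp [PySem.Dict.empty]
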